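-- pv_equiv track=rewrite | github.com/aalbiss/pythonES | IndirizziIP.py | submaskClassi
-- ===== SOURCE A (Python) =====
-- def submaskClassi(ott):
--     subnet = ""
--     if ott>=1 and ott<=127:
--         for i in range(1, 9):
--             subnet += "1"
--             if i % 8 == 0:
--                 subnet += "."
--
--         for i in range(1, (32 - 8) + 1):
--             subnet += "0"
--             if i % 8 == 0:
--                 subnet += "."
--
--     elif ott >= 128 and ott <= 191:
--         for i in range(1, 17):
--             subnet += "1"
--             if i % 8 == 0:
--                 subnet += "."
--
--         for i in range(1, (32 - 16) + 1):
--             subnet += "0"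
--             if i % 8 == 0:
--                 subnet += "."
--
--     elif ott >= 192 and ott <= 223:
--         for i in range(1, 25):
--             subnet += "1"
--             if i % 8 == 0:
--                 subnet += "."
--
--         for i in range(1, (32 - 24) + 1):
--             subnet += "0"
--             if i % 8 == 0:
--                 subnet += "."
--
--     elif ott >= 224 and ott <= 255:
--         for i in range(1, 33):
--             subnet += "1"
--             if i % 8 == 0:
--                 subnet += "."
--
--     subnet = subnet[:len(subnet) - 1]
--     return subnet
-- ===== SOURCE B (Python) =====
-- def submaskClassi(ott):
--     if 1 <= ott <= 127:
--         n = 8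
--     elif 128 <= ott <= 191:
--         n = 16
--     elif 192 <= ott <= 223:
--         n = 24
--     elif 224 <= ott <= 255:
--         n = 32
--     else:
--         return ""
--     bits = "1" * n + "0" * (32 - n)
--     return ".".join(bits[i:i + 8] for i in range(0, 32, 8))
-- ===== Notes on version B (the rewrite author's own statement) =====
-- stated objective: simpler
-- what changed: Replaces the per-character accumulation loops with a trailing-dot strip by a count-then-chunk decomposition: map the octet class to a prefix length, build a ones-then-zeros bit string of that shape, and join its fixed-width slices with dots.
import Mathlib
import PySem

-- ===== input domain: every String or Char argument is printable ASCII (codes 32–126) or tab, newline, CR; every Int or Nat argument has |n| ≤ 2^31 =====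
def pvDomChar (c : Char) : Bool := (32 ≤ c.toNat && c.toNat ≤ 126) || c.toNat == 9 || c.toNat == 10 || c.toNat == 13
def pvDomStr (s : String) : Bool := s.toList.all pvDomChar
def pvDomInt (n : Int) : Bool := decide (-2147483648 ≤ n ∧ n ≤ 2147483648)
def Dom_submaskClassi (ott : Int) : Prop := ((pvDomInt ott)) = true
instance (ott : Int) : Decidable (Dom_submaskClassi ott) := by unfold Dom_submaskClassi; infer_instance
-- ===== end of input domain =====

-- B replaces A's per-character accumulation loops (with trailing-dot strip) by a
-- count-then-chunk decomposition (prefix length, then '1'*n+'0'*(32-n) sliced into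
-- dot-joined octets); objective: simpler.

-- ===== PORT A =====
-- one loop iteration: subnet += c; if i % 8 == 0: subnet += "."  (on List Char;
-- Lean's String.append is kernel-opaque, so the accumulator is the char list)
def pvStepA (c : Char) (s : List Char) (i : Int) : List Char :=
  let s := s ++ [c]
  if PySem.Int.mod i 8 = 0 then s ++ ['.'] else s

def submaskClassi (ott : Int) : String :=
  let subnet : List Char := []
  let subnet :=
    if 1 ≤ ott ∧ ott ≤ 127 then
      let subnet := (PySem.List.pyRange 1 9 1).foldl (pvStepA '1') subnet
      (PySem.List.pyRange 1 ((32 - 8) + 1) 1).foldl (pvStepA '0') subnet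
    else if 128 ≤ ott ∧ ott ≤ 191 then
      let subnet := (PySem.List.pyRange 1 17 1).foldl (pvStepA '1') subnet
      (PySem.List.pyRange 1 ((32 - 16) + 1) 1).foldl (pvStepA '0') subnet
    else if 192 ≤ ott ∧ ott ≤ 223 then
      let subnet := (PySem.List.pyRange 1 25 1).foldl (pvStepA '1') subnet
      (PySem.List.pyRange 1 ((32 - 24) + 1) 1).foldl (pvStepA '0') subnet
    else if 224 ≤ ott ∧ ott ≤ 255 then
      (PySem.List.pyRange 1 33 1).foldl (pvStepA '1') subnet
    else subnet
  -- subnet = subnet[:len(subnet) - 1]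
  String.ofList (PySem.List.slice subnet none (some (PySem.List.len subnet - 1)))

-- ===== PORT B =====
def submaskClassi_alt (ott : Int) : String :=
  let n? : Option Nat :=
    if 1 ≤ ott ∧ ott ≤ 127 then some 8
    else if 128 ≤ ott ∧ ott ≤ 191 then some 16
    else if 192 ≤ ott ∧ ott ≤ 223 then some 24
    else if 224 ≤ ott ∧ ott ≤ 255 then some 32
    else none
  match n? with
  | none => ""
  | some n =>
    let bits : List Char := List.replicate n '1' ++ List.replicate (32 - n) '0'
    String.ofList (PySem.Chars.join ['.']
      ((PySem.List.pyRange 0 32 8).map (fun i => PySem.List.slice bits (some i) (some (i + 8)))))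

-- ===== PRECONDITION & SPEC =====
def Spec_submaskClassi (ott : Int) (out : String) : Prop := out = submaskClassi_alt ott
instance (ott : Int) (out : String) : Decidable (Spec_submaskClassi ott out) := by unfold Spec_submaskClassi; infer_instance

-- ===== CLAIM (what is proved, stated in full; the proofs are below) =====
def Claim_equal_submaskClassi : Prop := ∀ (ott : Int), Dom_submaskClassi ott → Spec_submaskClassi ott (submaskClassi ott)

-- ===== LEMMAS AND PROOFS =====

-- ===== VERDICT (by name: the statement is the Claim_ definition above) =====
theorem submaskClassi_spec : Claim_equal_submaskClassi := by
  intro ott _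
  unfold Spec_submaskClassi submaskClassi submaskClassi_alt
  split_ifs with h1 h2 h3 h4 <;> decide
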